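-- pv_equiv track=rewrite | github.com/JakeEhrlich/CXEMA | scripts/generate_test_vectors.py | sim_cx161
-- ===== SOURCE A (Python) =====
-- def sim_cx161(inputs: dict, n_ticks: int) -> dict:
--     """CX161: 4-bit counter with synchronous clear
--     On rising edge of CLK:
--       CLR=1: Q = 0
--       CLR=0: Q = Q + 1
--     """
--     q0, q1, q2, q3 = [0] * n_ticks, [0] * n_ticks, [0] * n_ticks, [0] * n_ticks
--     count = 0
--     prev_clk = 0
--     for t in range(n_ticks):
--         clk = inputs['CLK'][t]
--         clr = inputs['CLR'][t]
--         if clk and not prev_clk:  # Rising edge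
--             if clr:
--                 count = 0
--             else:
--                 count = (count + 1) % 16
--         q0[t] = count & 1
--         q1[t] = (count >> 1) & 1
--         q2[t] = (count >> 2) & 1
--         q3[t] = (count >> 3) & 1
--         prev_clk = clk
--     return {'Q0': q0, 'Q1': q1, 'Q2': q2, 'Q3': q3}
-- ===== SOURCE B (Python) =====
-- def sim_cx161(inputs: dict, n_ticks: int) -> dict:
--     """CX161: event-driven reimplementation.
--     Instead of simulating the counter tick by tick, first extract the rising-edge
--     positions, then run-length-fill the constant count segments between edges,
--     then project the four bit lists out of the count trace."""
--     if n_ticks <= 0: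
--         return {'Q0': [], 'Q1': [], 'Q2': [], 'Q3': []}
--     clk = inputs['CLK']
--     clr = inputs['CLR']
--     edges = [(t, clr[t]) for t in range(n_ticks)
--              if clk[t] and not (clk[t - 1] if t else 0)]
--     counts = []
--     value = 0
--     for t, c in edges:
--         counts.extend([value] * (t - len(counts)))
--         value = 0 if c else (value + 1) % 16
--     counts.extend([value] * (n_ticks - len(counts)))
--     return {'Q0': [c & 1 for c in counts],
--             'Q1': [(c >> 1) & 1 for c in counts],
--             'Q2': [(c >> 2) & 1 for c in counts],
--             'Q3': [(c >> 3) & 1 for c in counts]}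
-- ===== Notes on version B (the rewrite author's own statement) =====
-- stated objective: alternative
-- what changed: B replaces A's per-tick counter simulation (four pre-allocated bit arrays written every tick) by an event-driven construction: it extracts the rising-edge positions first, then run-length-fills the constant count segments between edges, then projects the four bit lists from the count trace.
import Mathlib
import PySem

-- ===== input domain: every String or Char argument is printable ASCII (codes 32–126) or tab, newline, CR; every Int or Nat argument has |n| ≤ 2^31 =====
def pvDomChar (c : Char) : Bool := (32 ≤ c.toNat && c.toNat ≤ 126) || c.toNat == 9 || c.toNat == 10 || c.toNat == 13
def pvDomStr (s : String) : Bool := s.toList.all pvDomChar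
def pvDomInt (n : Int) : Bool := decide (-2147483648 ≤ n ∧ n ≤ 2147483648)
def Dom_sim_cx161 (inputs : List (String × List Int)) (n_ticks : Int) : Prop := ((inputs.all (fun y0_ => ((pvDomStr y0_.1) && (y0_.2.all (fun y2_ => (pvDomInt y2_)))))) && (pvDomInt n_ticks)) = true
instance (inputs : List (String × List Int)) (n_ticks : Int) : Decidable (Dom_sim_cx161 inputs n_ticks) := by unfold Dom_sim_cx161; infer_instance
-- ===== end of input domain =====

-- B replaces A's per-tick counter simulation by an event-driven construction:
-- extract the rising-edge positions, run-length-fill the constant count segments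
-- between edges, then project the four bit lists (alternative algorithm, same cost).

-- ===== PORT A =====
-- Port of A: one loop that pre-allocates four zero arrays and writes one bit of
-- the counter into each array at every tick. Python's `x & 1` / `x >> k` on ints
-- are ported exactly as `PySem.Int.mod x 2` / `PySem.Int.floordiv x 2^k`.
def cxA_step (inputs : List (String × List Int))
    (st : List Int × List Int × List Int × List Int × Int × Int) (t : Int) :
    List Int × List Int × List Int × List Int × Int × Int :=
  let (q0, q1, q2, q3, count, prev_clk) := st
  let clk := PySem.List.pyGetD ((List.lookup "CLK" inputs).getD []) t 0
  let clr := PySem.List.pyGetD ((List.lookup "CLR" inputs).getD []) t 0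
  let count := if clk ≠ 0 ∧ prev_clk = 0 then
      (if clr ≠ 0 then (0:Int) else PySem.Int.mod (count + 1) 16) else count
  (q0.set t.toNat (PySem.Int.mod count 2),
   q1.set t.toNat (PySem.Int.mod (PySem.Int.floordiv count 2) 2),
   q2.set t.toNat (PySem.Int.mod (PySem.Int.floordiv count 4) 2),
   q3.set t.toNat (PySem.Int.mod (PySem.Int.floordiv count 8) 2),
   count, clk)

def sim_cx161 (inputs : List (String × List Int)) (n_ticks : Int) : List (String × List Int) :=
  let z : List Int := List.replicate n_ticks.toNat 0
  let r := (PySem.List.pyRange 0 n_ticks 1).foldl (cxA_step inputs) (z, z, z, z, 0, 0)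
  [("Q0", r.1), ("Q1", r.2.1), ("Q2", r.2.2.1), ("Q3", r.2.2.2.1)]

-- ===== PORT B =====
-- Port of B: early return for n_ticks ≤ 0; rising-edge list comprehension
-- (filterMap over the tick range); run-length fill of constant segments by a
-- fold over the edges; final fill; bit projections mapped over the count trace.
def cxSeg_step (st : List Int × Int) (tc : Int × Int) : List Int × Int :=
  (st.1 ++ List.replicate (tc.1 - (st.1.length : Int)).toNat st.2,
   if tc.2 ≠ 0 then (0:Int) else PySem.Int.mod (st.2 + 1) 16)

-- B's comprehension filter: a rising edge at tick t (clk[t] truthy, previous clk 0)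
def cxEdge (clk clr : List Int) (t : Int) : Option (Int × Int) :=
  if PySem.List.pyGetD clk t 0 ≠ 0 ∧ (if t ≠ 0 then PySem.List.pyGetD clk (t-1) 0 else 0) = 0
  then some (t, PySem.List.pyGetD clr t 0) else none

def sim_cx161_alt (inputs : List (String × List Int)) (n_ticks : Int) : List (String × List Int) :=
  if n_ticks ≤ 0 then [("Q0", []), ("Q1", []), ("Q2", []), ("Q3", [])]
  else
    let clk := (List.lookup "CLK" inputs).getD []
    let clr := (List.lookup "CLR" inputs).getD []
    let edges := (PySem.List.pyRange 0 n_ticks 1).filterMap (cxEdge clk clr)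
    let r := edges.foldl cxSeg_step ([], 0)
    let counts := r.1 ++ List.replicate (n_ticks - (r.1.length : Int)).toNat r.2
    [("Q0", counts.map (fun c => PySem.Int.mod c 2)),
     ("Q1", counts.map (fun c => PySem.Int.mod (PySem.Int.floordiv c 2) 2)),
     ("Q2", counts.map (fun c => PySem.Int.mod (PySem.Int.floordiv c 4) 2)),
     ("Q3", counts.map (fun c => PySem.Int.mod (PySem.Int.floordiv c 8) 2))]

-- ===== PRECONDITION & SPEC =====
-- Pre_ excludes exactly the inputs on which Python A raises: when n_ticks > 0 it
-- raises KeyError if 'CLK' or 'CLR' is missing, and IndexError if either signal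
-- list is shorter than n_ticks (B raises identically there).
def Pre_sim_cx161 (inputs : List (String × List Int)) (n_ticks : Int) : Prop :=
  n_ticks ≤ 0 ∨
    ((List.lookup "CLK" inputs).isSome = true ∧ (List.lookup "CLR" inputs).isSome = true ∧
     n_ticks ≤ ((List.lookup "CLK" inputs).getD []).length ∧
     n_ticks ≤ ((List.lookup "CLR" inputs).getD []).length)
instance (inputs : List (String × List Int)) (n_ticks : Int) : Decidable (Pre_sim_cx161 inputs n_ticks) := by unfold Pre_sim_cx161; infer_instance
def pvWitness_sim_cx161 : (List (String × List Int)) × Int := ([("CLK", [0, 1, 0]), ("CLR", [0, 0, 1])], 3)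
def Spec_sim_cx161 (inputs : List (String × List Int)) (n_ticks : Int) (out : List (String × List Int)) : Prop := out = sim_cx161_alt inputs n_ticks
instance (inputs : List (String × List Int)) (n_ticks : Int) (out : List (String × List Int)) : Decidable (Spec_sim_cx161 inputs n_ticks out) := by unfold Spec_sim_cx161; infer_instance

-- ===== CLAIM (what is proved, stated in full; the proofs are below) =====
def Claim_equal_sim_cx161 : Prop := ∀ (inputs : List (String × List Int)) (n_ticks : Int), Dom_sim_cx161 inputs n_ticks → Pre_sim_cx161 inputs n_ticks → Spec_sim_cx161 inputs n_ticks (sim_cx161 inputs n_ticks)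

-- ===== LEMMAS AND PROOFS =====
def cxBit0 (c : Int) : Int := PySem.Int.mod c 2
def cxBit1 (c : Int) : Int := PySem.Int.mod (PySem.Int.floordiv c 2) 2
def cxBit2 (c : Int) : Int := PySem.Int.mod (PySem.Int.floordiv c 4) 2
def cxBit3 (c : Int) : Int := PySem.Int.mod (PySem.Int.floordiv c 8) 2

-- proof-only reference: per-tick simulation that records one count per tick
def cxRef_step (clk clr : List Int) (st : List Int × Int × Int) (t : Int) : List Int × Int × Int :=
  let (counts, count, prev_clk) := st
  let clkv := PySem.List.pyGetD clk t 0
  let clrv := PySem.List.pyGetD clr t 0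
  let count := if clkv ≠ 0 ∧ prev_clk = 0 then
      (if clrv ≠ 0 then (0:Int) else PySem.Int.mod (count + 1) 16) else count
  (counts ++ [count], count, clkv)

-- A's fold over ticks [|cs|, |cs|+m), started from the bit projections of cs
-- padded with m zeros, equals the bit projections of the reference fold.
lemma cx_loop_inv (inputs : List (String × List Int)) (m : Nat) :
    ∀ (cs : List Int) (count prev : Int),
    (PySem.List.pyRange (cs.length : Int) ((cs.length : Int) + (m : Int)) 1).foldl
        (cxA_step inputs)
        (cs.map cxBit0 ++ List.replicate m 0, cs.map cxBit1 ++ List.replicate m 0,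
         cs.map cxBit2 ++ List.replicate m 0, cs.map cxBit3 ++ List.replicate m 0, count, prev)
    = (let r := (PySem.List.pyRange (cs.length : Int) ((cs.length : Int) + (m : Int)) 1).foldl
          (cxRef_step ((List.lookup "CLK" inputs).getD []) ((List.lookup "CLR" inputs).getD []))
          (cs, count, prev)
       (r.1.map cxBit0, r.1.map cxBit1, r.1.map cxBit2, r.1.map cxBit3, r.2.1, r.2.2)) := by
  induction m with
  | zero =>
    intro cs count prev
    rw [PySem.List.pyRange_one_eq_nil (by omega)]
    simp
  | succ m ih =>
    intro cs count prev
    rw [PySem.List.pyRange_one_cons (by omega)]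
    simp only [List.foldl_cons]
    set clkL := (List.lookup "CLK" inputs).getD [] with hclkL
    set clrL := (List.lookup "CLR" inputs).getD [] with hclrL
    have hstep : ∀ (q0 q1 q2 q3 : List Int),
        cxA_step inputs (q0, q1, q2, q3, count, prev) (cs.length : Int)
        = (q0.set cs.length (cxBit0 (cxRef_step clkL clrL (cs, count, prev) (cs.length : Int)).2.1),
           q1.set cs.length (cxBit1 (cxRef_step clkL clrL (cs, count, prev) (cs.length : Int)).2.1),
           q2.set cs.length (cxBit2 (cxRef_step clkL clrL (cs, count, prev) (cs.length : Int)).2.1),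
           q3.set cs.length (cxBit3 (cxRef_step clkL clrL (cs, count, prev) (cs.length : Int)).2.1),
           (cxRef_step clkL clrL (cs, count, prev) (cs.length : Int)).2.1,
           (cxRef_step clkL clrL (cs, count, prev) (cs.length : Int)).2.2) := by
      intro q0 q1 q2 q3
      simp [cxA_step, cxRef_step, cxBit0, cxBit1, cxBit2, cxBit3, hclkL, hclrL]
    rw [hstep]
    have hset : ∀ (f : Int → Int) (x : Int),
        (cs.map f ++ List.replicate (m+1) (0:Int)).set cs.length (f x)
        = (cs ++ [x]).map f ++ List.replicate m 0 := by
      intro f x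
      rw [List.replicate_succ, List.set_append]
      simp
    rw [hset cxBit0, hset cxBit1, hset cxBit2, hset cxBit3]
    set s := cxRef_step clkL clrL (cs, count, prev) (cs.length : Int) with hs
    have hB : s = (cs ++ [s.2.1], s.2.1, s.2.2) := by
      rw [hs]; simp [cxRef_step]
    rw [hB]
    have key := ih (cs ++ [s.2.1]) s.2.1 s.2.2
    simp only [List.length_append, List.length_cons, List.length_nil] at key
    have harg : ((cs.length + 1 : Nat) : Int) = (cs.length : Int) + 1 := by push_cast; ring
    have harg2 : (cs.length : Int) + 1 + (m : Int) = (cs.length : Int) + ((m + 1 : Nat) : Int) := by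
      push_cast; ring
    rw [harg, harg2] at key
    simpa [hclkL, hclrL] using key

-- segment-fill over the edges of the first n ticks reproduces the reference trace
lemma cx_seg_inv (clk clr : List Int) (n : Nat) :
    let R := (PySem.List.pyRange 0 (n : Int) 1).foldl (cxRef_step clk clr) ([], 0, 0)
    let E := ((PySem.List.pyRange 0 (n : Int) 1).filterMap (cxEdge clk clr)).foldl cxSeg_step ([], 0)
    E.1.length ≤ n ∧
    E.1 ++ List.replicate (n - E.1.length) E.2 = R.1 ∧
    E.2 = R.2.1 ∧
    R.2.2 = (if n = 0 then (0:Int) else PySem.List.pyGetD clk ((n : Int) - 1) 0) := by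
  induction n with
  | zero =>
    simp
  | succ n ih =>
    simp only at ih ⊢
    obtain ⟨hlen, hfill, hval, hprev⟩ := ih
    have hsplit : PySem.List.pyRange 0 ((n+1 : Nat) : Int) 1
        = PySem.List.pyRange 0 (n : Int) 1 ++ [(n : Int)] := by
      have : ((n+1 : Nat) : Int) = (n : Int) + 1 := by push_cast; ring
      rw [this, PySem.List.pyRange_one_succ_right (by positivity)]
    rw [hsplit, List.filterMap_append, List.foldl_append, List.foldl_append]
    set R := (PySem.List.pyRange 0 (n : Int) 1).foldl (cxRef_step clk clr) ([], 0, 0) with hR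
    set E := ((PySem.List.pyRange 0 (n : Int) 1).filterMap (cxEdge clk clr)).foldl cxSeg_step ([], 0) with hE
    have hRlen : R.1.length = n := by
      have := congrArg List.length hfill
      simp at this; omega
    -- the edge condition at tick n agrees with the prev_clk-based condition
    have hcond : (PySem.List.pyGetD clk (n : Int) 0 ≠ 0 ∧
        (if (n : Int) ≠ 0 then PySem.List.pyGetD clk ((n : Int)-1) 0 else 0) = 0)
        ↔ (PySem.List.pyGetD clk (n : Int) 0 ≠ 0 ∧ R.2.2 = 0) := by
      rcases Nat.eq_zero_or_pos n with h0 | hpos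
      · subst h0
        simp only [Nat.cast_zero] at hprev ⊢
        simp [hprev]
      · have hne : (n : Int) ≠ 0 := by omega
        rw [hprev, if_neg hpos.ne', if_pos hne]
    have hcast : ((n+1 : Nat) : Int) - 1 = (n : Int) := by push_cast; ring
    by_cases hc : PySem.List.pyGetD clk (n : Int) 0 ≠ 0 ∧ R.2.2 = 0
    · -- rising edge at tick n
      have hc' := hcond.mpr hc
      have hstep : cxRef_step clk clr R ((n : Nat) : Int) =
          (R.1 ++ [if PySem.List.pyGetD clr (n : Int) 0 ≠ 0 then (0:Int)
                   else PySem.Int.mod (R.2.1 + 1) 16],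
           (if PySem.List.pyGetD clr (n : Int) 0 ≠ 0 then (0:Int)
            else PySem.Int.mod (R.2.1 + 1) 16),
           PySem.List.pyGetD clk (n : Int) 0) := by
        simp only [PySem.List.pyGetD_natCast] at hc
        simp [cxRef_step, hc.2]
        intro hz
        exact absurd hz (by simpa using hc.1)
      simp only [cxEdge, if_pos hc', List.filterMap_cons, List.filterMap_nil,
        List.foldl_cons, List.foldl_nil, hstep]
      have hfillnat : ((n : Int) - (E.1.length : Int)).toNat = n - E.1.length := by omega
      have hE1 : E.1 ++ List.replicate ((n : Int) - (E.1.length : Int)).toNat E.2 = R.1 := by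
        rw [hfillnat, hfill]
      refine ⟨?_, ?_, ?_, ?_⟩
      · simp only [cxSeg_step]
        rw [hE1, hRlen]; omega
      · simp only [cxSeg_step]
        rw [hE1, hRlen, hval]
        simp
      · simp only [cxSeg_step, hval]
      · rw [if_neg (Nat.succ_ne_zero n), hcast]
    · -- no edge at tick n
      have hc' : ¬ (PySem.List.pyGetD clk (n : Int) 0 ≠ 0 ∧
          (if (n : Int) ≠ 0 then PySem.List.pyGetD clk ((n : Int)-1) 0 else 0) = 0) := by
        intro h; exact hc (hcond.mp h)
      have hstep : cxRef_step clk clr R ((n : Nat) : Int) =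
          (R.1 ++ [R.2.1], R.2.1, PySem.List.pyGetD clk (n : Int) 0) := by
        simp only [PySem.List.pyGetD_natCast] at hc
        simp [cxRef_step]
        intro h1 h2
        exact absurd ⟨by simpa using h1, h2⟩ hc
      simp only [cxEdge, if_neg hc', List.filterMap_cons, List.filterMap_nil,
        List.foldl_cons, List.foldl_nil, hstep]
      refine ⟨by omega, ?_, hval, ?_⟩
      · rw [show n + 1 - E.1.length = (n - E.1.length) + 1 from by omega,
          List.replicate_succ', ← List.append_assoc, hfill, hval]
      · rw [if_neg (Nat.succ_ne_zero n), hcast]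

-- ===== VERDICT (by name: the statement is the Claim_ definition above) =====
theorem sim_cx161_spec : Claim_equal_sim_cx161 := by
  intro inputs n_ticks _ _
  unfold Spec_sim_cx161 sim_cx161 sim_cx161_alt
  by_cases h : n_ticks ≤ 0
  · rw [PySem.List.pyRange_one_eq_nil h]
    simp [Int.toNat_of_nonpos h, h]
  · push Not at h
    rw [if_neg (by omega)]
    have hn : ((n_ticks.toNat : Nat) : Int) = n_ticks := Int.toNat_of_nonneg h.le
    have key := cx_loop_inv inputs n_ticks.toNat [] 0 0
    simp only [List.length_nil, List.map_nil, List.nil_append, Nat.cast_zero, zero_add, hn] at key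
    have seg := cx_seg_inv ((List.lookup "CLK" inputs).getD [])
      ((List.lookup "CLR" inputs).getD []) n_ticks.toNat
    simp only [hn] at seg
    obtain ⟨hlen, hfill, hval, _⟩ := seg
    set clkL := (List.lookup "CLK" inputs).getD [] with hclkL
    set clrL := (List.lookup "CLR" inputs).getD [] with hclrL
    set R := (PySem.List.pyRange 0 n_ticks 1).foldl (cxRef_step clkL clrL) ([], 0, 0) with hR
    simp only [key]
    set E := ((PySem.List.pyRange 0 n_ticks 1).filterMap (cxEdge clkL clrL)).foldl cxSeg_step ([], 0) with hEd
    have hcounts : E.1 ++ List.replicate (n_ticks - (E.1.length : Int)).toNat E.2 = R.1 := by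
      have hx : (n_ticks - (E.1.length : Int)).toNat = n_ticks.toNat - E.1.length := by omega
      rw [hx, hfill]
    rw [hcounts]
    rfl
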